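-- pv_equiv track=rewrite | github.com/maximweill/Lexarch2 | lexarchDataProcessing/OLD_phonotactics.py | check_sonority_gradient
-- ===== SOURCE A (Python) =====
-- def check_sonority_gradient(syllable:list,syllable_structure:list)->bool:
--     """Check if the syllable follows the sonority sequencing principle."""
--     sonority_scale = {
--         "vowel": 5,
--         "semivowel": 4,
--         "liquid": 3,
--         "nasal": 2,
--         "fricative": 1,
--         "stop": 0
--     }
--     sonority_values = [sonority_scale[category] for category in syllable_structure]
--
--     # Find the peak (vowel)
--     peak_index = sonority_values.index(max(sonority_values))
--
--     # Check increasing sonority to the peak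
--     for i in range(peak_index):
--         if sonority_values[i] > sonority_values[i+1]:
--             return False
--
--     # Check decreasing sonority after the peak
--     for i in range(peak_index, len(sonority_values)-1):
--         if sonority_values[i] < sonority_values[i+1]:
--             return False
--
--     return True
-- ===== SOURCE B (Python) =====
-- def check_sonority_gradient(syllable: list, syllable_structure: list) -> bool:
--     """Check if the syllable follows the sonority sequencing principle.
--
--     Same mapping and peak as A, but validates the rise/fall by comparing the
--     two slices around the peak with their sorted forms instead of pairwise scans.
--     """
--     sonority_scale = {
--         "vowel": 5,
--         "semivowel": 4,
--         "liquid": 3,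
--         "nasal": 2,
--         "fricative": 1,
--         "stop": 0
--     }
--     sonority_values = [sonority_scale[category] for category in syllable_structure]
--     peak_index = sonority_values.index(max(sonority_values))
--     left = sonority_values[:peak_index + 1]
--     right = sonority_values[peak_index:]
--     return left == sorted(left) and right == sorted(right, reverse=True)
-- ===== Notes on version B (the rewrite author's own statement) =====
-- stated objective: simpler
-- what changed: Replaces the two index-based pairwise scans around the peak with slicing the list at the peak and comparing each slice with its sorted form (ascending left, descending right).
import Mathlib
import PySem

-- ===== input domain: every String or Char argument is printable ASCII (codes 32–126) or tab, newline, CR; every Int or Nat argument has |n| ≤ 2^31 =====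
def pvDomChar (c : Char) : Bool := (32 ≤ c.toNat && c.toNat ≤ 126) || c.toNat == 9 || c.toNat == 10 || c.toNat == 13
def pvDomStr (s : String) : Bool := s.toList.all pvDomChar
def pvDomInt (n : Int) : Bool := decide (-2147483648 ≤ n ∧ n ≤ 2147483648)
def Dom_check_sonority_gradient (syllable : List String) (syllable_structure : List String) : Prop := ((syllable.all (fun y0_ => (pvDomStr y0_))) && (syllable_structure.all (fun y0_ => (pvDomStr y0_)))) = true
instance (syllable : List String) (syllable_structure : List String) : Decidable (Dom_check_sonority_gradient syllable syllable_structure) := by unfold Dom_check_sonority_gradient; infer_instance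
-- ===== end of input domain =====

-- B replaces A's two index-based pairwise scans around the sonority peak with
-- slicing at the peak and comparing each slice with its sorted form (objective: simpler).

-- ===== PORT A =====
-- the sonority_scale dict (looked up under Pre_, where every category is a key;
-- the 0 default of getD is never used inside Pre_)
def sonorityScale : PySem.Dict String Int :=
  ⟨[("vowel", 5), ("semivowel", 4), ("liquid", 3), ("nasal", 2), ("fricative", 1), ("stop", 0)]⟩

-- everything of A after the comprehension, over sonority_values
def gradA (sonority_values : List Int) : Bool :=
  match PySem.List.max? sonority_values (fun x => x) with
  | none => false        -- Python: ValueError on an empty list; excluded by Pre_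
  | some m =>
    match PySem.List.index? sonority_values m with
    | none => false      -- unreachable: the max is a member
    | some peak_index =>
      -- for i in range(peak_index): if values[i] > values[i+1]: return False
      if (PySem.List.pyRange 0 (peak_index : Int) 1).all
          (fun i => !(PySem.List.pyGetD sonority_values i 0 > PySem.List.pyGetD sonority_values (i + 1) 0)) then
        -- for i in range(peak_index, len(values)-1): if values[i] < values[i+1]: return False
        if (PySem.List.pyRange (peak_index : Int) (PySem.List.len sonority_values - 1) 1).all
            (fun i => !(PySem.List.pyGetD sonority_values i 0 < PySem.List.pyGetD sonority_values (i + 1) 0)) then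
          true
        else false
      else false

def check_sonority_gradient (syllable : List String) (syllable_structure : List String) : Bool :=
  gradA (syllable_structure.map (fun category => sonorityScale.getD category 0))

-- ===== PORT B =====
-- everything of B after the comprehension, over sonority_values
def gradB (sonority_values : List Int) : Bool :=
  match PySem.List.max? sonority_values (fun x => x) with
  | none => false        -- Python: ValueError on an empty list; excluded by Pre_
  | some m =>
    match PySem.List.index? sonority_values m with
    | none => false      -- unreachable: the max is a member
    | some peak_index =>
      -- left = values[:peak_index+1]; right = values[peak_index:]
      -- return left == sorted(left) and right == sorted(right, reverse=True)
      decide (PySem.List.slice sonority_values (some 0) (some ((peak_index : Int) + 1))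
                = PySem.List.sorted (PySem.List.slice sonority_values (some 0) (some ((peak_index : Int) + 1))) (fun x => x) false) &&
      decide (PySem.List.slice sonority_values (some (peak_index : Int)) none
                = PySem.List.sorted (PySem.List.slice sonority_values (some (peak_index : Int)) none) (fun x => x) true)

def check_sonority_gradient_alt (syllable : List String) (syllable_structure : List String) : Bool :=
  gradB (syllable_structure.map (fun category => sonorityScale.getD category 0))

-- ===== PRECONDITION & SPEC =====
-- Pre_ excludes exactly the inputs where A (and B alike) raise: the empty
-- syllable_structure (ValueError from max) and categories outside the six
-- sonority_scale keys (KeyError in the comprehension).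
def Pre_check_sonority_gradient (syllable : List String) (syllable_structure : List String) : Prop :=
  syllable_structure ≠ [] ∧ ∀ c ∈ syllable_structure,
    c ∈ ["vowel", "semivowel", "liquid", "nasal", "fricative", "stop"]
instance (syllable : List String) (syllable_structure : List String) : Decidable (Pre_check_sonority_gradient syllable syllable_structure) := by unfold Pre_check_sonority_gradient; infer_instance

def pvWitness_check_sonority_gradient : List String × List String :=
  (["t", "a", "n"], ["stop", "vowel", "nasal"])

def Spec_check_sonority_gradient (syllable : List String) (syllable_structure : List String) (out : Bool) : Prop := out = check_sonority_gradient_alt syllable syllable_structure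
instance (syllable : List String) (syllable_structure : List String) (out : Bool) : Decidable (Spec_check_sonority_gradient syllable syllable_structure out) := by unfold Spec_check_sonority_gradient; infer_instance

-- ===== CLAIM (what is proved, stated in full; the proofs are below) =====
def Claim_equal_check_sonority_gradient : Prop := ∀ (syllable : List String) (syllable_structure : List String), Dom_check_sonority_gradient syllable syllable_structure → Pre_check_sonority_gradient syllable syllable_structure → Spec_check_sonority_gradient syllable syllable_structure (check_sonority_gradient syllable syllable_structure)

-- ===== LEMMAS AND PROOFS =====

-- "xs equals its ascending sort" is exactly "xs is pairwise ≤"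
theorem eq_sorted_iff_pairwise (xs : List Int) :
    (xs = PySem.List.sorted xs (fun x => x) false) ↔ xs.Pairwise (· ≤ ·) := by
  constructor
  · intro h
    have := PySem.List.sorted_pairwise (xs := xs) (key := fun x => x)
    rw [← h] at this
    exact this
  · intro h
    exact (PySem.List.sorted_eq_self_of_pairwise _ _ h).symm

-- "xs equals its descending sort" is exactly "xs is pairwise ≥"
theorem eq_sorted_rev_iff_pairwise (xs : List Int) :
    (xs = PySem.List.sorted xs (fun x => x) true) ↔ xs.Pairwise (fun a b => b ≤ a) := by
  constructor
  · intro h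
    have := PySem.List.sorted_pairwise_rev (xs := xs) (key := fun x => x)
    rw [← h] at this
    exact this
  · intro h
    exact (PySem.List.sorted_rev_eq_self_of_pairwise _ _ h).symm

theorem pyGetD_succ_natCast (vs : List Int) (j : Nat) :
    PySem.List.pyGetD vs ((j : Int) + 1) 0 = vs.getD (j + 1) 0 := by
  rw [show ((j : Int) + 1) = ((j + 1 : Nat) : Int) by push_cast; ring,
    PySem.List.pyGetD_natCast]

-- A's first scan over range(peak) says: no descent among adjacent positions below the peak
theorem scan_left_iff (vs : List Int) (peak : Nat) :
    ((PySem.List.pyRange 0 (peak : Int) 1).all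
      (fun i => !(PySem.List.pyGetD vs i 0 > PySem.List.pyGetD vs (i + 1) 0)) = true)
    ↔ ∀ j : Nat, j < peak → vs.getD j 0 ≤ vs.getD (j + 1) 0 := by
  rw [List.all_eq_true]
  constructor
  · intro h j hj
    have hmem : (j : Int) ∈ PySem.List.pyRange 0 (peak : Int) 1 := by
      rw [PySem.List.mem_pyRange_one]; omega
    have := h _ hmem
    rw [PySem.List.pyGetD_natCast, pyGetD_succ_natCast] at this
    simpa using this
  · intro h i hi
    rw [PySem.List.mem_pyRange_one] at hi
    obtain ⟨j, rfl⟩ := Int.eq_ofNat_of_zero_le hi.1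
    show (!(PySem.List.pyGetD vs (j : Int) 0 > PySem.List.pyGetD vs ((j : Int) + 1) 0)) = true
    rw [PySem.List.pyGetD_natCast, pyGetD_succ_natCast]
    simpa using h j (by exact_mod_cast hi.2)

-- A's second scan over range(peak, len-1) says: no ascent among adjacent positions from the peak on
theorem scan_right_iff (vs : List Int) (peak : Nat) :
    ((PySem.List.pyRange (peak : Int) (PySem.List.len vs - 1) 1).all
      (fun i => !(PySem.List.pyGetD vs i 0 < PySem.List.pyGetD vs (i + 1) 0)) = true)
    ↔ ∀ j : Nat, peak ≤ j → j + 1 < vs.length → vs.getD (j + 1) 0 ≤ vs.getD j 0 := by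
  rw [List.all_eq_true]
  constructor
  · intro h j hj hj1
    have hmem : (j : Int) ∈ PySem.List.pyRange (peak : Int) (PySem.List.len vs - 1) 1 := by
      rw [PySem.List.mem_pyRange_one, PySem.List.len_eq]; omega
    have := h _ hmem
    rw [PySem.List.pyGetD_natCast, pyGetD_succ_natCast] at this
    simpa using this
  · intro h i hi
    rw [PySem.List.mem_pyRange_one, PySem.List.len_eq] at hi
    obtain ⟨h0, h1⟩ := hi
    obtain ⟨j, rfl⟩ := Int.eq_ofNat_of_zero_le (by omega : (0 : Int) ≤ i)
    show (!(PySem.List.pyGetD vs (j : Int) 0 < PySem.List.pyGetD vs ((j : Int) + 1) 0)) = true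
    rw [PySem.List.pyGetD_natCast, pyGetD_succ_natCast]
    simpa using h j (by exact_mod_cast h0) (by omega)

-- Pairwise on a list of Ints is the adjacent-pairs condition (via IsChain)
theorem pairwise_le_iff_adj (xs : List Int) :
    xs.Pairwise (· ≤ ·) ↔ ∀ j : Nat, j + 1 < xs.length → xs.getD j 0 ≤ xs.getD (j + 1) 0 := by
  rw [← List.isChain_iff_pairwise, List.isChain_iff_getElem]
  constructor
  · intro h j hj
    have := h j hj
    rwa [List.getD_eq_getElem xs 0 (by omega), List.getD_eq_getElem xs 0 (by omega)]
  · intro h j hj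
    have := h j hj
    rwa [List.getD_eq_getElem xs 0 (by omega), List.getD_eq_getElem xs 0 (by omega)] at this

theorem pairwise_ge_iff_adj (xs : List Int) :
    xs.Pairwise (fun a b => b ≤ a) ↔ ∀ j : Nat, j + 1 < xs.length → xs.getD (j + 1) 0 ≤ xs.getD j 0 := by
  rw [← List.isChain_iff_pairwise, List.isChain_iff_getElem]
  constructor
  · intro h j hj
    have := h j hj
    rwa [List.getD_eq_getElem xs 0 (by omega), List.getD_eq_getElem xs 0 (by omega)]
  · intro h j hj
    have := h j hj
    rwa [List.getD_eq_getElem xs 0 (by omega), List.getD_eq_getElem xs 0 (by omega)] at this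

theorem getD_take_eq (xs : List Int) (n j : Nat) (hj : j < n) (hjl : j < xs.length) :
    (xs.take n).getD j 0 = xs.getD j 0 := by
  rw [List.getD_eq_getElem (xs.take n) 0 (by simp [List.length_take]; omega),
    List.getD_eq_getElem xs 0 hjl, List.getElem_take]

theorem getD_drop_eq (xs : List Int) (n j : Nat) (hj : n + j < xs.length) :
    (xs.drop n).getD j 0 = xs.getD (n + j) 0 := by
  rw [List.getD_eq_getElem (xs.drop n) 0 (by simp [List.length_drop]; omega),
    List.getD_eq_getElem xs 0 hj, List.getElem_drop]

-- the heart of the claim: A's two scans agree with B's two slice-vs-sorted comparisons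
theorem gradA_eq_gradB (vs : List Int) : gradA vs = gradB vs := by
  unfold gradA gradB
  cases hm : PySem.List.max? vs (fun x => x) with
  | none => rfl
  | some m =>
    dsimp only
    cases hi : PySem.List.index? vs m with
    | none => rfl
    | some peak =>
      dsimp only
      obtain ⟨hpeak, -, -⟩ := PySem.List.getElem_of_index?_eq_some hi
      have hleft : PySem.List.slice vs (some 0) (some ((peak : Int) + 1)) = vs.take (peak + 1) := by
        rw [show ((peak : Int) + 1) = ((peak + 1 : Nat) : Int) by push_cast; ring,
          show ((0 : Int)) = ((0 : Nat) : Int) from rfl, PySem.List.slice_natCast]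
        simp
      have hright : PySem.List.slice vs (some (peak : Int)) none = vs.drop peak :=
        PySem.List.slice_from_natCast ..
      rw [hleft, hright]
      have hL : ((PySem.List.pyRange 0 (peak : Int) 1).all
          (fun i => !(PySem.List.pyGetD vs i 0 > PySem.List.pyGetD vs (i + 1) 0)))
          = decide (vs.take (peak + 1) = PySem.List.sorted (vs.take (peak + 1)) (fun x => x) false) := by
        rw [Bool.eq_iff_iff, decide_eq_true_iff, eq_sorted_iff_pairwise, pairwise_le_iff_adj,
          scan_left_iff]
        have hlen : (vs.take (peak + 1)).length = peak + 1 := by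
          rw [List.length_take]; omega
        constructor
        · intro h j hj
          rw [hlen] at hj
          rw [getD_take_eq vs (peak + 1) j (by omega) (by omega),
              getD_take_eq vs (peak + 1) (j + 1) (by omega) (by omega)]
          exact h j (by omega)
        · intro h j hj
          have := h j (by rw [hlen]; omega)
          rwa [getD_take_eq vs (peak + 1) j (by omega) (by omega),
              getD_take_eq vs (peak + 1) (j + 1) (by omega) (by omega)] at this
      have hR : ((PySem.List.pyRange (peak : Int) (PySem.List.len vs - 1) 1).all
          (fun i => !(PySem.List.pyGetD vs i 0 < PySem.List.pyGetD vs (i + 1) 0)))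
          = decide (vs.drop peak = PySem.List.sorted (vs.drop peak) (fun x => x) true) := by
        rw [Bool.eq_iff_iff, decide_eq_true_iff, eq_sorted_rev_iff_pairwise, pairwise_ge_iff_adj,
          scan_right_iff]
        have hlen : (vs.drop peak).length = vs.length - peak := List.length_drop ..
        constructor
        · intro h j hj
          rw [hlen] at hj
          rw [getD_drop_eq vs peak j (by omega), getD_drop_eq vs peak (j + 1) (by omega),
            show peak + (j + 1) = (peak + j) + 1 by omega]
          exact h (peak + j) (by omega) (by omega)
        · intro h j hj hj1
          have hj' : (j - peak) + 1 < (vs.drop peak).length := by rw [hlen]; omega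
          have := h (j - peak) hj'
          rw [getD_drop_eq vs peak (j - peak) (by omega),
            getD_drop_eq vs peak (j - peak + 1) (by omega)] at this
          rwa [show peak + (j - peak) = j by omega, show peak + (j - peak + 1) = j + 1 by omega] at this
      rw [hL, hR]
      cases decide (vs.take (peak + 1) = PySem.List.sorted (vs.take (peak + 1)) (fun x => x) false) <;>
      cases decide (vs.drop peak = PySem.List.sorted (vs.drop peak) (fun x => x) true) <;> simp

-- ===== VERDICT (by name: the statement is the Claim_ definition above) =====
theorem check_sonority_gradient_spec : Claim_equal_check_sonority_gradient := by
  intro syllable syllable_structure _hdom _hpre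
  unfold Spec_check_sonority_gradient check_sonority_gradient check_sonority_gradient_alt
  exact gradA_eq_gradB _
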